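-- pv_equiv track=rewrite | github.com/PersonaWoodoo/Willd-gramm | bot.py | normalize_promo_code
-- ===== SOURCE A (Python) =====
-- import string
--
-- def normalize_promo_code(text):
--     code = str(text or "").strip().upper()
--     allowed = set(string.ascii_uppercase + string.digits + "_-")
--     if not (3 <= len(code) <= 24):
--         raise ValueError
--     if any(ch not in allowed for ch in code):
--         raise ValueError
--     return code
-- ===== SOURCE B (Python) =====
-- import re
--
-- def normalize_promo_code(text):
--     code = str(text or "").strip().upper()
--     if re.fullmatch(r'[A-Z0-9_-]{3,24}', code) is None:
--         raise ValueError
--     return code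
-- ===== Notes on version B (the rewrite author's own statement) =====
-- stated objective: idiomatic
-- what changed: A's separate length guard and per-character whitelist scan against a built set are replaced by a single re.fullmatch of the regex [A-Z0-9_-]{3,24}, which validates length and character class in one engine pass.
-- outside the precondition, e.g. on normalize_promo_code('ab'): A raises ValueError, B raises ValueError; on normalize_promo_code('abc!'): A raises ValueError, B raises ValueError; on normalize_promo_code('_'): A raises ValueError, B raises ValueError
import Mathlib
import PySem

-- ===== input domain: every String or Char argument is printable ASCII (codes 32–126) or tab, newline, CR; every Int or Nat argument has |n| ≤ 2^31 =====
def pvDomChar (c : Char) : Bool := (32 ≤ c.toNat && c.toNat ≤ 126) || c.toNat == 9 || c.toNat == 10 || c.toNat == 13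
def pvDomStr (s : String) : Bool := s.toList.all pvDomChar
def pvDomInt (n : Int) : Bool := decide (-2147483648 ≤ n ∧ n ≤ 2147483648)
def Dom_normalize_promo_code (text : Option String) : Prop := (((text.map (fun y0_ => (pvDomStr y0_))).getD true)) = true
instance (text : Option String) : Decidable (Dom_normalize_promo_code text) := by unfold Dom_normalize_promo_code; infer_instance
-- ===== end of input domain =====

-- B replaces A's separate length guard and character-whitelist scan by a single regex fullmatch
-- (objective: idiomatic); both raise ValueError on invalid codes — those inputs are outside Pre_.

-- ===== PORT A =====
-- allowed = set(string.ascii_uppercase + string.digits + "_-")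
def pvAllowedA : PySem.Set Char :=
  PySem.Set.ofList (("ABCDEFGHIJKLMNOPQRSTUVWXYZ".toList ++ "0123456789".toList) ++ "_-".toList)

def normalize_promo_code (text : Option String) : String :=
  -- code = str(text or "").strip().upper()   (None and "" are falsy → "")
  let code := PySem.Str.upper (PySem.Str.strip (match text with
    | none => ""
    | some s => if PySem.Str.len s ≠ 0 then s else ""))
  if ¬ (3 ≤ PySem.Str.len code ∧ PySem.Str.len code ≤ 24) then ""  -- raise ValueError (outside Pre_)
  else if code.toList.any (fun ch => !(PySem.Set.contains pvAllowedA ch)) then ""  -- raise ValueError (outside Pre_)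
  else code

-- ===== PORT B =====
-- One step of the regex character class [A-Z0-9_-]
def pvClassChar (c : Char) : Bool :=
  (decide ('A' ≤ c) && decide (c ≤ 'Z')) || (decide ('0' ≤ c) && decide (c ≤ '9')) || c == '_' || c == '-'

-- re.fullmatch(r'[A-Z0-9_-]{3,24}', code) ≠ None, ported exactly as the regex engine runs this
-- deterministic pattern: consume class characters left to right counting them (at most 24), and
-- at the end of input require at least 3 consumed.
def pvFullmatch : List Char → Nat → Bool
  | [], n => decide (3 ≤ n)
  | c :: rest, n => if n < 24 && pvClassChar c then pvFullmatch rest (n + 1) else false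

def normalize_promo_code_alt (text : Option String) : String :=
  let code := PySem.Str.upper (PySem.Str.strip (match text with
    | none => ""
    | some s => if PySem.Str.len s ≠ 0 then s else ""))
  if pvFullmatch code.toList 0 then code else ""  -- fullmatch is None: raise ValueError (outside Pre_)

-- ===== PRECONDITION & SPEC =====
-- Pre_ excludes exactly the inputs on which A raises ValueError: the stripped upper-cased code
-- must have length 3..24 and consist of A-Z, 0-9, '_' and '-' only (B raises there too).
def Pre_normalize_promo_code (text : Option String) : Prop :=
  3 ≤ (PySem.Str.upper (PySem.Str.strip (text.getD ""))).toList.length ∧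
  (PySem.Str.upper (PySem.Str.strip (text.getD ""))).toList.length ≤ 24 ∧
  (PySem.Str.upper (PySem.Str.strip (text.getD ""))).toList.all pvClassChar = true
instance (text : Option String) : Decidable (Pre_normalize_promo_code text) := by
  unfold Pre_normalize_promo_code; infer_instance

def pvWitness_normalize_promo_code : Option String := some "ABC"

def Spec_normalize_promo_code (text : Option String) (out : String) : Prop := out = normalize_promo_code_alt text
instance (text : Option String) (out : String) : Decidable (Spec_normalize_promo_code text out) := by unfold Spec_normalize_promo_code; infer_instance

-- ===== CLAIM (what is proved, stated in full; the proofs are below) =====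
def Claim_equal_normalize_promo_code : Prop := ∀ (text : Option String), Dom_normalize_promo_code text → Pre_normalize_promo_code text → Spec_normalize_promo_code text (normalize_promo_code text)

-- ===== LEMMAS AND PROOFS =====

-- The regex character class and A's whitelist set agree on every character.
lemma pvContains_eq_class (c : Char) : PySem.Set.contains pvAllowedA c = pvClassChar c := by
  have hA : pvAllowedA = "ABCDEFGHIJKLMNOPQRSTUVWXYZ0123456789_-".toList := by decide
  have hall : "ABCDEFGHIJKLMNOPQRSTUVWXYZ0123456789_-".toList.all pvClassChar = true := by decide
  rcases h : pvClassChar c with _ | _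
  · -- not in the class ⇒ not in the list
    rw [Bool.eq_false_iff]
    intro hc
    have hm : c ∈ "ABCDEFGHIJKLMNOPQRSTUVWXYZ0123456789_-".toList := by
      rw [← List.contains_iff_mem, ← hA]; exact hc
    rw [List.all_eq_true.mp hall c hm] at h
    exact Bool.noConfusion h
  · -- in the class ⇒ in the list: identify c by its code point
    simp only [pvClassChar, Bool.or_eq_true, Bool.and_eq_true, decide_eq_true_eq, beq_iff_eq] at h
    have hc : Char.ofNat c.toNat = c := Char.ofNat_toNat c
    have hb : (65 ≤ c.toNat ∧ c.toNat ≤ 90) ∨ (48 ≤ c.toNat ∧ c.toNat ≤ 57) ∨ c.toNat = 95 ∨ c.toNat = 45 := by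
      rcases h with ((⟨h1, h2⟩ | ⟨h1, h2⟩) | h) | h
      · exact Or.inl ⟨(Char.le_def.mp h1 : _), (Char.le_def.mp h2 : _)⟩
      · exact Or.inr (Or.inl ⟨(Char.le_def.mp h1 : _), (Char.le_def.mp h2 : _)⟩)
      · subst h; exact Or.inr (Or.inr (Or.inl rfl))
      · subst h; exact Or.inr (Or.inr (Or.inr rfl))
    rw [hA, ← hc]
    set n := c.toNat with hn
    clear_value n
    rcases hb with ⟨h1, h2⟩ | ⟨h1, h2⟩ | h | h
    · interval_cases n <;> decide
    · interval_cases n <;> decide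
    · subst h; decide
    · subst h; decide

-- pvFullmatch succeeds exactly on 3..24 class characters (counting from n ≤ 24).
lemma pvFullmatch_iff (l : List Char) (n : Nat) (hn : n ≤ 24) :
    pvFullmatch l n = true ↔ (3 ≤ n + l.length ∧ n + l.length ≤ 24 ∧ ∀ c ∈ l, pvClassChar c = true) := by
  induction l generalizing n with
  | nil => simp [pvFullmatch]; omega
  | cons c rest ih =>
    simp only [pvFullmatch, List.length_cons]
    by_cases hcc : pvClassChar c = true
    · by_cases hlt : n < 24
      · rw [if_pos (by simp [hlt, hcc]), ih (n + 1) (by omega)]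
        simp only [List.forall_mem_cons, hcc, true_and]
        constructor <;> rintro ⟨ha, hb, hrest⟩ <;> exact ⟨by omega, by omega, hrest⟩
      · rw [if_neg (by simp [hlt])]
        simp only [Bool.false_eq_true, false_iff]
        rintro ⟨ha, hb, _⟩
        omega
    · rw [if_neg (by simp [hcc])]
      simp only [Bool.false_eq_true, false_iff, List.forall_mem_cons]
      rintro ⟨_, _, hcl, _⟩
      exact hcc hcl
-- `text or ""` computes the same string as `text.getD ""` (Pre_'s phrasing of it).
lemma pvOr_eq_getD (text : Option String) :
    (match text with | none => "" | some s => if PySem.Str.len s ≠ 0 then s else "") = text.getD "" := by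
  rcases text with _ | s
  · rfl
  · simp only [Option.getD_some]
    by_cases h : PySem.Str.len s ≠ 0
    · simp
    · simp only [ne_eq, Decidable.not_not] at h
      have hs : s = "" := by
        apply String.toList_inj.mp
        have hl := PySem.Str.len_eq s
        rw [h] at hl
        cases hlist : s.toList with
        | nil => rfl
        | cons a l => rw [hlist] at hl; simp at hl; omega
      simp [hs]

-- ===== VERDICT (by name: the statement is the Claim_ definition above) =====
theorem normalize_promo_code_spec : Claim_equal_normalize_promo_code := by
  intro text _hdom hpre
  unfold Spec_normalize_promo_code normalize_promo_code normalize_promo_code_alt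
  rw [pvOr_eq_getD]
  obtain ⟨h1, h2, h3'⟩ := hpre
  have h3 := List.all_eq_true.mp h3' 
  set code := PySem.Str.upper (PySem.Str.strip (text.getD "")) with hcode
  have hlen : PySem.Str.len code = (code.toList.length : Int) := PySem.Str.len_eq code
  have hB : pvFullmatch code.toList 0 = true := by
    rw [pvFullmatch_iff _ 0 (by omega)]
    exact ⟨by omega, by omega, h3⟩
  have hA1 : ¬ ¬ (3 ≤ PySem.Str.len code ∧ PySem.Str.len code ≤ 24) := by
    rw [hlen, not_not]
    exact ⟨by exact_mod_cast h1, by exact_mod_cast h2⟩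
  have hA2 : (code.toList.any fun ch => !(PySem.Set.contains pvAllowedA ch)) = false := by
    rw [List.any_eq_false]
    intro ch hch
    rw [Bool.not_eq_true, Bool.not_eq_false', pvContains_eq_class]
    exact h3 ch hch
  rw [if_neg hA1, if_pos hB, if_neg (by rw [hA2]; simp)]
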